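-- pv_equiv track=rewrite | github.com/Monica-1107/legalmind | backend/services/knowledge_graph_service.py | _extract_entities_and_relationships
-- ===== SOURCE A (Python) =====
-- def _extract_entities_and_relationships(text):
--     """
--     Extract entities and relationships from text.
--     This is a simplified implementation that should be replaced with
--     a more sophisticated NLP approach in production.
--
--     Args:
--         text (str): Text to extract from
--
--     Returns:
--         tuple: (entities, relationships)
--     """
--     # This is a placeholder implementation
--     # In a real application, you would use NLP libraries like spaCy or NLTK
--     # to extract named entities, relationships, etc.
--
--     # For now, we'll just extract some basic entities
--     entities = []
--     relationships = []
--
--     # Simple entity extraction (words that start with capital letters)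
--     words = text.split()
--     for i, word in enumerate(words):
--         # Clean the word (remove punctuation at the end)
--         clean_word = word.rstrip('.,;:!?')
--
--         if clean_word and clean_word[0].isupper() and len(clean_word) > 2:
--             entity_id = f"entity_{i}"
--             entities.append({
--                 'id': entity_id,
--                 'label': clean_word,
--                 'type': 'entity'
--             })
--
--             # Create relationships between consecutive entities
--             if i > 0:
--                 prev_word = words[i-1].rstrip('.,;:!?')
--                 if prev_word and prev_word[0].isupper():
--                     prev_entity_id = f"entity_{i-1}"
--                     relationships.append({
--                         'source': prev_entity_id,
--                         'target': entity_id,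
--                         'label': 'related_to'
--                     })
--
--     return entities, relationships
-- ===== SOURCE B (Python) =====
-- def _extract_entities_and_relationships(text):
--     """Streaming re-implementation: a single character-level scan (no split(),
--     no rstrip(), no word list).  A buffer collects the current word; whitespace
--     flushes it, trimming trailing punctuation and emitting the entity and the
--     relationship to the previously flushed word on the fly."""
--     entities = []
--     relationships = []
--     i = 0               # index of the word being flushed
--     prev_cap = False    # was the previous word's cleaned form capitalized?
--     buf = []
--     for ch in text + ' ':           # sentinel space flushes the last word
--         if ch.isspace():
--             if buf:
--                 while buf and buf[-1] in '.,;:!?':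
--                     buf.pop()
--                 cap = bool(buf) and buf[0].isupper()
--                 if cap and len(buf) > 2:
--                     entities.append({'id': f'entity_{i}',
--                                      'label': ''.join(buf),
--                                      'type': 'entity'})
--                     if i > 0 and prev_cap:
--                         relationships.append({'source': f'entity_{i-1}',
--                                               'target': f'entity_{i}',
--                                               'label': 'related_to'})
--                 prev_cap = cap
--                 buf = []
--                 i += 1
--         else:
--             buf.append(ch)
--     return entities, relationships
-- ===== Notes on version B (the rewrite author's own statement) =====
-- stated objective: alternative
-- what changed: A splits the text into a word list and loops over enumerated words with index lookups into that list; B never builds a word list: it is a single character-level streaming state machine that buffers the current word and, on each whitespace boundary, trims, classifies and emits the entity/relationship on the fly while carrying the previous word's capitalization flag.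
import Mathlib
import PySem

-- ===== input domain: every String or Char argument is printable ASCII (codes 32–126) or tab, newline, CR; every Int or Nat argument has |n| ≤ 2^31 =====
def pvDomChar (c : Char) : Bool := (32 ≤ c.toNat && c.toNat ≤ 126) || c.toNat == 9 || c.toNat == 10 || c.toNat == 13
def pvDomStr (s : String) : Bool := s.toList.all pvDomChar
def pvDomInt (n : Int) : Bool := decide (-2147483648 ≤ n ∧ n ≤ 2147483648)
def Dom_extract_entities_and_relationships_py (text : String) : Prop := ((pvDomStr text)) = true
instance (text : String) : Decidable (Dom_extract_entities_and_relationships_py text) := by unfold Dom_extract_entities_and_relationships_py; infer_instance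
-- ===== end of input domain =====

-- B replaces A's split()-then-index word loop by a single character-level streaming
-- state machine (objective: alternative decomposition, same cost).

-- ===== PORT A =====
-- hand port of Python's  s.rstrip('.,;:!?')  (exact: removes trailing chars from that set)
def pvClean (s : String) : String :=
  String.ofList ((s.toList.reverse.dropWhile (fun c => c ∈ ['.', ',', ';', ':', '!', '?'])).reverse)

-- port of Python's  s and s[0].isupper()  (short-circuit: pyGet? is none exactly on "")
def pvCapB (s : String) : Bool :=
  match PySem.Str.pyGet? s 0 with
  | some c => PySem.Chars.isupper c
  | none => false

def extract_entities_and_relationships_py (text : String) :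
    (List (List (String × String))) × (List (List (String × String))) :=
  let words := PySem.Str.split₀ text
  (PySem.List.enumerate words).foldl
    (fun st p =>
      let i := p.1
      let clean := pvClean p.2
      if pvCapB clean && decide (PySem.Str.len clean > 2) then
        let entity_id := "entity_" ++ PySem.Int.toStr i
        let ents := st.1 ++ [[("id", entity_id), ("label", clean), ("type", "entity")]]
        if i > 0 then
          let prev := pvClean (PySem.List.pyGetD words (i - 1) "")
          if pvCapB prev then
            (ents, st.2 ++ [[("source", "entity_" ++ PySem.Int.toStr (i - 1)),
                             ("target", entity_id), ("label", "related_to")]])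
          else (ents, st.2)
        else (ents, st.2)
      else st)
    ([], [])

-- ===== PORT B =====
-- transliteration of Source B's  `while buf and buf[-1] in '.,;:!?': buf.pop()`
-- (popping the last element = consuming the head of the reversed buffer)
def pvPopRev : List Char → List Char
  | [] => []
  | c :: r => if c ∈ ['.', ',', ';', ':', '!', '?'] then pvPopRev r else c :: r

def pvTrim (buf : List Char) : List Char := (pvPopRev buf.reverse).reverse

-- the flush block run when whitespace ends a nonempty buffer (Source B's `if buf:` body);
-- state t = (i, prev_cap, entities, relationships)
def pvFinal
    (t : Int × Bool × List (List (String × String)) × List (List (String × String)))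
    (buf : List Char) :
    Int × Bool × List (List (String × String)) × List (List (String × String)) :=
  let clean := pvTrim buf
  -- `cap = bool(buf) and buf[0].isupper()` after trimming
  let cap := match clean with
    | [] => false
    | c :: _ => PySem.Chars.isupper c
  if cap && decide (clean.length > 2) then
    let eid := "entity_" ++ PySem.Int.toStr t.1
    -- `''.join(buf)` on a list of single characters is the string of those characters
    let ents := t.2.2.1 ++ [[("id", eid), ("label", String.ofList clean), ("type", "entity")]]
    if decide (t.1 > 0) && t.2.1 then
      (t.1 + 1, cap, ents,
       t.2.2.2 ++ [[("source", "entity_" ++ PySem.Int.toStr (t.1 - 1)),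
                    ("target", eid), ("label", "related_to")]])
    else (t.1 + 1, cap, ents, t.2.2.2)
  else (t.1 + 1, cap, t.2.2.1, t.2.2.2)

-- one character of Source B's loop; state st = (buf, (i, prev_cap, entities, relationships))
def pvCharStep
    (st : List Char × Int × Bool × List (List (String × String)) × List (List (String × String)))
    (ch : Char) :
    List Char × Int × Bool × List (List (String × String)) × List (List (String × String)) :=
  if PySem.Chars.isspace ch then
    if st.1.isEmpty then st else ([], pvFinal st.2 st.1)
  else (st.1 ++ [ch], st.2)

-- `for ch in text + ' '` iterates the characters of text followed by the sentinel space
def extract_entities_and_relationships_py_alt (text : String) :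
    (List (List (String × String))) × (List (List (String × String))) :=
  let st := (text.toList ++ [' ']).foldl pvCharStep ([], (0 : Int), false, [], [])
  (st.2.2.2.1, st.2.2.2.2)

-- ===== PRECONDITION & SPEC =====
def Spec_extract_entities_and_relationships_py (text : String) (out : (List (List (String × String))) × (List (List (String × String)))) : Prop := out = extract_entities_and_relationships_py_alt text
instance (text : String) (out : (List (List (String × String))) × (List (List (String × String)))) : Decidable (Spec_extract_entities_and_relationships_py text out) := by unfold Spec_extract_entities_and_relationships_py; infer_instance

-- ===== CLAIM (what is proved, stated in full; the proofs are below) =====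
def Claim_equal_extract_entities_and_relationships_py : Prop := ∀ (text : String), Dom_extract_entities_and_relationships_py text → Spec_extract_entities_and_relationships_py text (extract_entities_and_relationships_py text)

-- ===== LEMMAS AND PROOFS =====

-- canonical per-index data over the word list (String side, proof helpers)
def pvCleanAt (words : List String) (k : Nat) : String := pvClean (words.getD k "")
def pvCapAt (words : List String) (k : Nat) : Bool := pvCapB (pvCleanAt words k)
def pvP (words : List String) (k : Nat) : Bool :=
  pvCapAt words k && decide (PySem.Str.len (pvCleanAt words k) > 2)
def pvQ (words : List String) (k : Nat) : Bool :=
  decide ((k : Int) > 0) && pvCapAt words (k - 1)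
def pvEnt (words : List String) (k : Nat) : List (String × String) :=
  [("id", "entity_" ++ PySem.Int.toStr (k : Int)),
   ("label", pvCleanAt words k), ("type", "entity")]
def pvRel (_words : List String) (k : Nat) : List (String × String) :=
  [("source", "entity_" ++ PySem.Int.toStr ((k : Int) - 1)),
   ("target", "entity_" ++ PySem.Int.toStr (k : Int)), ("label", "related_to")]

-- A's loop body, named (identical to the lambda in the port of A)
def pvStepFn (words : List String)
    (st : (List (List (String × String))) × (List (List (String × String))))
    (p : Int × String) :
    (List (List (String × String))) × (List (List (String × String))) :=
  let i := p.1
  let clean := pvClean p.2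
  if pvCapB clean && decide (PySem.Str.len clean > 2) then
    let entity_id := "entity_" ++ PySem.Int.toStr i
    let ents := st.1 ++ [[("id", entity_id), ("label", clean), ("type", "entity")]]
    if i > 0 then
      let prev := pvClean (PySem.List.pyGetD words (i - 1) "")
      if pvCapB prev then
        (ents, st.2 ++ [[("source", "entity_" ++ PySem.Int.toStr (i - 1)),
                         ("target", entity_id), ("label", "related_to")]])
      else (ents, st.2)
    else (ents, st.2)
  else st

lemma pvStep_eq (words : List String) (k : Nat) (st :
    (List (List (String × String))) × (List (List (String × String)))) :
    pvStepFn words st (((k : Nat) : Int), words.getD k "") =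
      (st.1 ++ (if pvP words k then [pvEnt words k] else []),
       st.2 ++ (if pvP words k && pvQ words k then [pvRel words k] else [])) := by
  cases k with
  | zero =>
    simp only [pvStepFn, Nat.cast_zero]
    have e1 : (pvCapB (pvClean (words.getD 0 "")) &&
        decide (PySem.Str.len (pvClean (words.getD 0 "")) > 2)) = pvP words 0 := rfl
    rw [e1, if_neg (by omega : ¬ (0:Int) > 0)]
    have hq0 : pvQ words 0 = false := by simp [pvQ]
    cases hp : pvP words 0 <;> simp [hq0, pvEnt, pvCleanAt]
  | succ m =>
    simp only [pvStepFn]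
    have hc : ((m + 1 : Nat) : Int) - 1 = ((m : Nat) : Int) := by push_cast; ring
    have hpos : ((m + 1 : Nat) : Int) > 0 := by positivity
    rw [hc, PySem.List.pyGetD_natCast, if_pos hpos]
    have e1 : (pvCapB (pvClean (words.getD (m + 1) "")) &&
        decide (PySem.Str.len (pvClean (words.getD (m + 1) "")) > 2)) = pvP words (m + 1) := rfl
    have e2 : pvCapB (pvClean (words.getD m "")) = pvCapAt words m := rfl
    rw [e1, e2]
    have hq : pvQ words (m + 1) = pvCapAt words m := by simp [pvQ]
    cases hp : pvP words (m + 1) <;> cases hcap : pvCapAt words m <;>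
      simp [hcap, hq, pvEnt, pvRel, pvCleanAt]

lemma pvLoop (words : List String) (n : Nat) :
    List.foldl (pvStepFn words) ([], [])
        ((List.range n).map (fun (k : Nat) => ((k : Int), words.getD k "")))
      = (((List.range n).filter (pvP words)).map (pvEnt words),
         ((((List.range n).filter (pvP words)).filter (fun k => pvQ words k)).map (pvRel words))) := by
  induction n with
  | zero => simp
  | succ n ih =>
    rw [List.range_succ, List.map_append, List.foldl_append, ih]
    simp only [List.map_cons, List.map_nil, List.foldl_cons, List.foldl_nil]
    rw [pvStep_eq]
    by_cases hP : pvP words n = true <;> by_cases hQ : pvQ words n = true <;>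
      simp [hP, hQ, List.filter_append]

lemma pv_getD_map {α β : Type} (f : α → β) (l : List α) (k : Nat) (d : α) :
    (l.map f).getD k (f d) = f (l.getD k d) := by
  simp only [List.getD, List.getElem?_map]
  cases l[k]? <;> simp

lemma pvA_eq (text : String) :
    extract_entities_and_relationships_py text =
      (((List.range (PySem.Str.split₀ text).length).filter (pvP (PySem.Str.split₀ text))).map
          (pvEnt (PySem.Str.split₀ text)),
       ((((List.range (PySem.Str.split₀ text).length).filter
            (pvP (PySem.Str.split₀ text))).filter
              (fun k => pvQ (PySem.Str.split₀ text) k)).map (pvRel (PySem.Str.split₀ text)))) := by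
  have h0 : extract_entities_and_relationships_py text =
      List.foldl (pvStepFn (PySem.Str.split₀ text)) ([], [])
        (PySem.List.enumerate (PySem.Str.split₀ text)) := rfl
  rw [h0, PySem.List.enumerate_eq_map_pyRange (PySem.Str.split₀ text) "",
    PySem.List.len_eq, PySem.List.pyRange_zero_natCast, List.map_map]
  have h1 : ((fun j => (j, PySem.List.pyGetD (PySem.Str.split₀ text) j "")) ∘
      fun (k : Nat) => (k : Int)) =
      fun (k : Nat) => ((k : Int), (PySem.Str.split₀ text).getD k "") := by
    funext k
    simp [PySem.List.pyGetD_natCast]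
  rw [h1, pvLoop]

-- ===== B side: canonical per-index data over the char-word list =====
def pvCCleanAt (vs : List (List Char)) (k : Nat) : List Char := pvTrim (vs.getD k [])
def pvCCap (l : List Char) : Bool :=
  match l with
  | [] => false
  | c :: _ => PySem.Chars.isupper c
def pvCCapAt (vs : List (List Char)) (k : Nat) : Bool := pvCCap (pvCCleanAt vs k)
def pvCP (vs : List (List Char)) (k : Nat) : Bool :=
  pvCCapAt vs k && decide ((pvCCleanAt vs k).length > 2)
def pvCQ (vs : List (List Char)) (k : Nat) : Bool :=
  decide ((k : Int) > 0) && pvCCapAt vs (k - 1)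
def pvCEnt (vs : List (List Char)) (k : Nat) : List (String × String) :=
  [("id", "entity_" ++ PySem.Int.toStr (k : Int)),
   ("label", String.ofList (pvCCleanAt vs k)), ("type", "entity")]
def pvCRel (_vs : List (List Char)) (k : Nat) : List (String × String) :=
  [("source", "entity_" ++ PySem.Int.toStr ((k : Int) - 1)),
   ("target", "entity_" ++ PySem.Int.toStr (k : Int)), ("label", "related_to")]
def pvLastCap (vs : List (List Char)) : Bool :=
  if vs.isEmpty then false else pvCCapAt vs (vs.length - 1)

-- split₀.go's word accumulator distributes
lemma pv_go_acc (cs : List Char) : ∀ (cur : List Char) (acc : List (List Char)),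
    PySem.Chars.split₀.go cs cur acc = acc.reverse ++ PySem.Chars.split₀.go cs cur [] := by
  induction cs with
  | nil => intro cur acc; simp [PySem.Chars.split₀.go]; split <;> simp
  | cons c rest ih =>
    intro cur acc
    simp only [PySem.Chars.split₀.go]
    split
    · split
      · exact ih [] acc
      · rw [ih [] (cur.reverse :: acc), ih [] [cur.reverse]]; simp
    · exact ih (c :: cur) acc

-- the character machine over cs ++ [' '] equals the word-level fold over split₀ cs
lemma pvChars_to_words (cs : List Char) : ∀ (cur : List Char)
    (t : Int × Bool × List (List (String × String)) × List (List (String × String))),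
    (cs ++ [' ']).foldl pvCharStep (cur, t) =
      ([], (PySem.Chars.split₀.go cs cur.reverse []).foldl pvFinal t) := by
  have hsp : PySem.Chars.isspace ' ' = true := by decide
  induction cs with
  | nil =>
    intro cur t
    simp only [List.nil_append, List.foldl_cons, List.foldl_nil, pvCharStep,
      PySem.Chars.split₀.go, hsp, if_true]
    cases cur with
    | nil => simp
    | cons x xs => simp
  | cons c rest ih =>
    intro cur t
    simp only [List.cons_append, List.foldl_cons, pvCharStep, PySem.Chars.split₀.go,
      List.reverse_reverse]
    by_cases hs : PySem.Chars.isspace c = true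
    · rw [if_pos hs, if_pos hs]
      cases cur with
      | nil => simpa using ih [] t
      | cons x xs =>
        rw [if_neg (by simp), if_neg (by simp)]
        rw [pv_go_acc rest [] [x :: xs]]
        simpa using ih [] (pvFinal t (x :: xs))
    · rw [if_neg hs, if_neg hs]
      have := ih (cur ++ [c]) t
      rw [List.reverse_append] at this
      simpa using this

lemma pvCQ_last (vs : List (List Char)) (w : List Char) :
    (decide ((vs.length : Int) > 0) && pvLastCap vs) = pvCQ (vs ++ [w]) vs.length := by
  cases vs with
  | nil => simp [pvLastCap, pvCQ]
  | cons v vt =>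
    have hpos : (((v :: vt).length : Nat) : Int) > 0 := by
      exact_mod_cast Nat.succ_pos vt.length
    have hget : ((v :: vt) ++ [w]).getD ((v :: vt).length - 1) [] =
        (v :: vt).getD ((v :: vt).length - 1) [] :=
      List.getD_append _ _ _ _ (by simp)
    simp only [pvCQ, pvLastCap, pvCCapAt, pvCCleanAt, List.isEmpty_cons,
      Bool.false_eq_true, if_false, hpos, decide_true, Bool.true_and]
    rw [hget]

lemma pvFinal_eq (vs : List (List Char)) (w : List Char)
    (E R : List (List (String × String))) :
    pvFinal ((vs.length : Int), pvLastCap vs, E, R) w =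
      ((vs.length : Int) + 1, pvCCapAt (vs ++ [w]) vs.length,
       E ++ (if pvCP (vs ++ [w]) vs.length then [pvCEnt (vs ++ [w]) vs.length] else []),
       R ++ (if pvCP (vs ++ [w]) vs.length && pvCQ (vs ++ [w]) vs.length
             then [pvCRel (vs ++ [w]) vs.length] else [])) := by
  have hget : (vs ++ [w]).getD vs.length [] = w := by
    simp [List.getD]
  have hclean : pvCCleanAt (vs ++ [w]) vs.length = pvTrim w := by
    simp [pvCCleanAt, hget]
  simp only [pvFinal]
  have hcap : (match pvTrim w with
      | [] => false
      | c :: _ => PySem.Chars.isupper c) = pvCCapAt (vs ++ [w]) vs.length := by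
    simp [pvCCapAt, hclean, pvCCap]
  have hP : (pvCCapAt (vs ++ [w]) vs.length && decide ((pvTrim w).length > 2)) =
      pvCP (vs ++ [w]) vs.length := by
    simp [pvCP, hclean]
  rw [hcap, hP]
  rw [pvCQ_last vs w]
  cases hp : pvCP (vs ++ [w]) vs.length <;>
    cases hq : pvCQ (vs ++ [w]) vs.length <;>
      simp [hp, hq, pvCEnt, pvCRel, hclean]

lemma pvCClean_stable (vs : List (List Char)) (w : List Char) (k : Nat)
    (hk : k < vs.length) : pvCCleanAt (vs ++ [w]) k = pvCCleanAt vs k := by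
  simp [pvCCleanAt, List.getD, List.getElem?_append_left hk]

lemma pvCP_stable (vs : List (List Char)) (w : List Char) (k : Nat)
    (hk : k < vs.length) : pvCP (vs ++ [w]) k = pvCP vs k := by
  simp [pvCP, pvCCapAt, pvCClean_stable vs w k hk]

lemma pvCQ_stable (vs : List (List Char)) (w : List Char) (k : Nat)
    (hk : k < vs.length) : pvCQ (vs ++ [w]) k = pvCQ vs k := by
  have hk' : k - 1 < vs.length := by omega
  simp [pvCQ, pvCCapAt, pvCClean_stable vs w _ hk']

lemma pvCEnt_stable (vs : List (List Char)) (w : List Char) (k : Nat)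
    (hk : k < vs.length) : pvCEnt (vs ++ [w]) k = pvCEnt vs k := by
  simp [pvCEnt, pvCClean_stable vs w k hk]

-- the word-level fold computes the canonical filtered/mapped form
lemma pvWordFold (vs : List (List Char)) :
    vs.foldl pvFinal ((0 : Int), false, [], []) =
      ((vs.length : Int), pvLastCap vs,
       ((List.range vs.length).filter (pvCP vs)).map (pvCEnt vs),
       (((List.range vs.length).filter (pvCP vs)).filter (fun k => pvCQ vs k)).map (pvCRel vs)) := by
  induction vs using List.reverseRecOn with
  | nil => simp [pvLastCap]
  | append_singleton vs w ih =>
    rw [List.foldl_append, ih]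
    simp only [List.foldl_cons, List.foldl_nil]
    rw [pvFinal_eq]
    have hn : (vs ++ [w]).length = vs.length + 1 := by simp
    have hE : (List.range vs.length).filter (pvCP (vs ++ [w])) =
        (List.range vs.length).filter (pvCP vs) :=
      List.filter_congr (fun k hk => pvCP_stable vs w k (List.mem_range.mp hk))
    have hEm : ((List.range vs.length).filter (pvCP vs)).map (pvCEnt (vs ++ [w])) =
        ((List.range vs.length).filter (pvCP vs)).map (pvCEnt vs) :=
      List.map_congr_left (fun k hk =>
        pvCEnt_stable vs w k (List.mem_range.mp (List.mem_filter.mp hk).1))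
    have hQf : ((List.range vs.length).filter (pvCP vs)).filter
          (fun k => pvCQ (vs ++ [w]) k) =
        ((List.range vs.length).filter (pvCP vs)).filter (fun k => pvCQ vs k) :=
      List.filter_congr (fun k hk =>
        pvCQ_stable vs w k (List.mem_range.mp (List.mem_filter.mp hk).1))
    have hRel : pvCRel (vs ++ [w]) = pvCRel vs := rfl
    have hlast : pvLastCap (vs ++ [w]) = pvCCapAt (vs ++ [w]) vs.length := by
      simp [pvLastCap]
    rw [hn, List.range_succ, List.filter_append, hE, List.map_append, hEm,
      List.filter_append, hQf, List.map_append, hlast, hRel]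
    have hcast : ((vs.length + 1 : Nat) : Int) = ((vs.length : Int) + 1) := by push_cast; ring
    rw [hcast]
    cases hp : pvCP (vs ++ [w]) vs.length <;>
      cases hq : pvCQ (vs ++ [w]) vs.length <;>
        simp only [hp, hq, List.filter_cons, List.filter_nil, Bool.false_and,
          Bool.true_and, if_true, if_false, List.map_cons, List.map_nil,
          List.append_nil, Bool.false_eq_true]

-- ===== transfer: char-side canonical data = String-side canonical data =====
lemma pvPopRev_eq (l : List Char) :
    pvPopRev l = l.dropWhile (fun c => c ∈ ['.', ',', ';', ':', '!', '?']) := by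
  induction l with
  | nil => rfl
  | cons c r ih =>
    by_cases h : c ∈ ['.', ',', ';', ':', '!', '?'] <;>
      simp [pvPopRev, List.dropWhile, h, ih]

lemma pvTrim_toList (s : String) : pvTrim s.toList = (pvClean s).toList := by
  unfold pvTrim pvClean
  rw [pvPopRev_eq, String.toList_ofList]

lemma pvCCap_eq (s : String) : pvCCap s.toList = pvCapB s := by
  have h : PySem.Str.pyGet? s 0 = s.toList[(0 : Nat)]? := by
    rw [show (0 : Int) = ((0 : Nat) : Int) from rfl, PySem.Str.pyGet?_natCast]
  cases hl : s.toList <;>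
    simp [pvCCap, pvCapB, hl, PySem.List.pyGet?, PySem.List.pyIdx?]

lemma pvTransClean (words : List String) (k : Nat) :
    pvCCleanAt (words.map String.toList) k = (pvCleanAt words k).toList := by
  have h : ([] : List Char) = ("" : String).toList := rfl
  rw [pvCCleanAt, h, pv_getD_map, pvTrim_toList]; rfl

lemma pvTransCap (words : List String) (k : Nat) :
    pvCCapAt (words.map String.toList) k = pvCapAt words k := by
  rw [pvCCapAt, pvTransClean, pvCCap_eq]; rfl

lemma pvTransP (words : List String) :
    pvCP (words.map String.toList) = pvP words := by
  funext k
  rw [pvCP, pvP, pvTransCap, pvTransClean]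
  simp [pvCapAt]

lemma pvTransQ (words : List String) (k : Nat) :
    pvCQ (words.map String.toList) k = pvQ words k := by
  rw [pvCQ, pvQ, pvTransCap]

lemma pvTransEnt (words : List String) :
    pvCEnt (words.map String.toList) = pvEnt words := by
  funext k
  rw [pvCEnt, pvEnt, pvTransClean, String.ofList_toList]

lemma pvB_eq (text : String) :
    extract_entities_and_relationships_py_alt text =
      (((List.range (PySem.Str.split₀ text).length).filter (pvP (PySem.Str.split₀ text))).map
          (pvEnt (PySem.Str.split₀ text)),
       ((((List.range (PySem.Str.split₀ text).length).filter
            (pvP (PySem.Str.split₀ text))).filter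
              (fun k => pvQ (PySem.Str.split₀ text) k)).map (pvRel (PySem.Str.split₀ text)))) := by
  have h0 : extract_entities_and_relationships_py_alt text =
      (let st := (text.toList ++ [' ']).foldl pvCharStep ([], (0 : Int), false, [], [])
       (st.2.2.2.1, st.2.2.2.2)) := rfl
  rw [h0]
  rw [show (([], (0 : Int), false, [], []) :
      List Char × Int × Bool × List (List (String × String)) × List (List (String × String))) =
      (([] : List Char), ((0 : Int), false, [], [])) from rfl]
  rw [pvChars_to_words text.toList [] ((0 : Int), false, [], [])]
  have hgo : PySem.Chars.split₀.go text.toList [].reverse [] =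
      (PySem.Str.split₀ text).map String.toList := by
    rw [PySem.Str.split₀_map_toList]; rfl
  rw [hgo, pvWordFold]
  have hlen : ((PySem.Str.split₀ text).map String.toList).length =
      (PySem.Str.split₀ text).length := by rw [List.length_map]
  rw [hlen, pvTransP, pvTransEnt]
  have hQ : (fun k => pvCQ ((PySem.Str.split₀ text).map String.toList) k) =
      (fun k => pvQ (PySem.Str.split₀ text) k) := by
    funext k; exact pvTransQ _ k
  rw [hQ]
  rfl

-- ===== VERDICT (by name: the statement is the Claim_ definition above) =====
theorem extract_entities_and_relationships_py_spec : Claim_equal_extract_entities_and_relationships_py := by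
  intro text _
  unfold Spec_extract_entities_and_relationships_py
  rw [pvA_eq, pvB_eq]
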